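-- pv_equiv track=rewrite | github.com/mikaelvincent/intrinsic-rl | code/irl/experiments/validation.py | _validate_seed_coverage_parity
-- ===== SOURCE A (Python) =====
-- from typing import Any, Iterable
--
-- def _as_int(x: Any) -> int | None:
--     try:
--         return int(x)
--     except Exception:
--         return None
--
-- def _validate_seed_coverage_parity(raw_rows: Iterable[dict[str, str]]) -> tuple[list[str], list[str]]:
--     errors: list[str] = []
--     warnings: list[str] = []
--
--     seeds_by_env_method: dict[tuple[str, str], set[int]] = {}
--     methods_by_env: dict[str, set[str]] = {}
--
--     for r in raw_rows:
--         env_id = (r.get("env_id") or "").strip()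
--         method = (r.get("method") or "").strip()
--         seed_i = _as_int(r.get("seed"))
--         if not env_id or not method or seed_i is None:
--             continue
--         k = (env_id, method)
--         seeds_by_env_method.setdefault(k, set()).add(int(seed_i))
--         methods_by_env.setdefault(env_id, set()).add(method)
--
--     for env_id, methods in sorted(methods_by_env.items(), key=lambda kv: kv[0]):
--         if len(methods) <= 1:
--             continue
--
--         union: set[int] = set()
--         for m in methods:
--             union |= seeds_by_env_method.get((env_id, m), set())
--
--         for m in sorted(methods):
--             have = seeds_by_env_method.get((env_id, m), set())
--             missing = sorted(union - have)
--             if missing: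
--                 errors.append(f"Seed coverage mismatch env={env_id} method={m}: missing {missing}")
--
--     if not seeds_by_env_method:
--         warnings.append("No (env_id, method, seed) rows found in summary_raw.csv")
--
--     return errors, warnings
-- ===== SOURCE B (Python) =====
-- from typing import Any, Iterable
--
--
-- def _row_triple(r: dict[str, str]) -> tuple[str, str, int] | None:
--     env = (r.get("env_id") or "").strip()
--     method = (r.get("method") or "").strip()
--     try:
--         seed = int(r.get("seed"))
--     except (TypeError, ValueError):
--         return None
--     if not env or not method:
--         return None
--     return (env, method, seed)
--
--
-- def _validate_seed_coverage_parity(raw_rows: Iterable[dict[str, str]]) -> tuple[list[str], list[str]]: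
--     triples: list[tuple[str, str, int]] = []
--     for r in raw_rows:
--         t = _row_triple(r)
--         if t is not None:
--             triples.append(t)
--
--     errors: list[str] = []
--     for env in sorted({t[0] for t in triples}):
--         methods = sorted({t[1] for t in triples if t[0] == env})
--         if len(methods) <= 1:
--             continue
--         seeds = sorted({t[2] for t in triples if t[0] == env})
--         have = {(t[1], t[2]) for t in triples if t[0] == env}
--         for m in methods:
--             missing = [s for s in seeds if (m, s) not in have]
--             if missing:
--                 errors.append(f"Seed coverage mismatch env={env} method={m}: missing {missing}")
--
--     warnings: list[str] = []
--     if not triples: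
--         warnings.append("No (env_id, method, seed) rows found in summary_raw.csv")
--     return errors, warnings
-- ===== Notes on version B (the rewrite author's own statement) =====
-- stated objective: alternative
-- what changed: B replaces A's incrementally built dicts of per-(env,method) seed sets and per-env method sets (with a union-then-set-difference per method) by a flat list of parsed (env,method,seed) triples processed in staged passes: per sorted env it derives methods, seeds and the covered (method,seed) pairs by filtering the triple list, and a method's missing seeds are the env's seeds whose pair is not covered.
import Mathlib
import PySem

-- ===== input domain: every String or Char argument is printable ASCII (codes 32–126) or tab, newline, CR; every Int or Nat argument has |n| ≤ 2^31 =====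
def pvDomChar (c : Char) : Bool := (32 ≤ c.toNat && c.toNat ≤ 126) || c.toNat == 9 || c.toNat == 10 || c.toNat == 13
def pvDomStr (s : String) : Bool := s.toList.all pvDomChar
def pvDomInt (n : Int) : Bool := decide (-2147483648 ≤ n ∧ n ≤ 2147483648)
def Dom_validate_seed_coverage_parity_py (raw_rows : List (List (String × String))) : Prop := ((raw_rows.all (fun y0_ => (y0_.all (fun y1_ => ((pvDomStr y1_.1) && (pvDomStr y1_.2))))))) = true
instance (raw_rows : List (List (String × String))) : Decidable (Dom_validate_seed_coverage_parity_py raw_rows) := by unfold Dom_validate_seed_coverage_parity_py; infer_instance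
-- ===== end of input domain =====

-- B drops A's incrementally built dicts (per-(env,method) seed sets, per-env method sets,
-- union-then-set-difference) for a flat list of parsed (env, method, seed) triples processed in
-- staged passes: per sorted env it derives methods, seeds and the covered (method, seed) pairs by
-- filtering that list, and missing seeds are the env's seeds whose pair is not covered
-- (alternative decomposition, same observable result).

-- shared formatting helper (the f-string of both Pythons; a Python list of ints prints as "[a, b]")
def pvErrMsg (env_id m : String) (missing : List Int) : String :=
  "Seed coverage mismatch env=" ++ env_id ++ " method=" ++ m ++ ": missing [" ++
    PySem.Str.join ", " (missing.map PySem.Int.toStr) ++ "]"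

-- ===== PORT A =====
-- helper _as_int: int(x) where x is None or a str; None/unparsable -> none
def pvAsInt_py (x : Option String) : Option Int := x.bind PySem.Int.ofStr?

def validate_seed_coverage_parity_py (raw_rows : List (List (String × String))) : List String × List String :=
  let st : PySem.Dict (String × String) (PySem.Set Int) × PySem.Dict String (PySem.Set String) :=
    raw_rows.foldl (fun st r =>
      let d : PySem.Dict String String := PySem.Dict.mk r
      let env_id := PySem.Str.strip ((d.get? "env_id").getD "")
      let method := PySem.Str.strip ((d.get? "method").getD "")
      match pvAsInt_py (d.get? "seed") with
      | none => st
      | some s =>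
        if env_id = "" ∨ method = "" then st
        else (PySem.Dict.modify st.1 (env_id, method) PySem.Set.empty (fun v => PySem.Set.add v s),
              PySem.Dict.modify st.2 env_id PySem.Set.empty (fun v => PySem.Set.add v method))
      ) (PySem.Dict.empty, PySem.Dict.empty)
  let sbem := st.1
  let mbe := st.2
  let errors := (PySem.List.sorted mbe.items (fun kv => kv.1) false).foldl (fun errors kv =>
    let env_id := kv.1
    let methods := kv.2
    if PySem.Set.len methods ≤ 1 then errors
    else
      let union := methods.foldl (fun u m => PySem.Set.union u (sbem.getD (env_id, m) PySem.Set.empty)) PySem.Set.empty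
      (PySem.List.sorted methods (fun m => m) false).foldl (fun errors m =>
        let haveS := sbem.getD (env_id, m) PySem.Set.empty
        let missing := PySem.List.sorted (PySem.Set.diff union haveS) (fun s => s) false
        if missing = [] then errors else errors ++ [pvErrMsg env_id m missing]) errors) []
  let warnings := if sbem.items = [] then ["No (env_id, method, seed) rows found in summary_raw.csv"] else []
  (errors, warnings)

-- ===== PORT B =====
-- helper _row_triple: parse one row to (env, method, seed), or none if it is to be skipped
def pvRowTriple (r : List (String × String)) : Option (String × String × Int) :=
  let d : PySem.Dict String String := PySem.Dict.mk r
  let env := PySem.Str.strip ((d.get? "env_id").getD "")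
  let method := PySem.Str.strip ((d.get? "method").getD "")
  match (d.get? "seed").bind PySem.Int.ofStr? with
  | none => none
  | some seed => if env = "" ∨ method = "" then none else some (env, method, seed)

def validate_seed_coverage_parity_py_alt (raw_rows : List (List (String × String))) : List String × List String :=
  let triples : List (String × String × Int) :=
    raw_rows.foldl (fun acc r =>
      match pvRowTriple r with
      | none => acc
      | some t => acc ++ [t]) []
  let errors : List String :=
    (PySem.List.sorted (PySem.Set.ofList (triples.map (fun t => t.1))) (fun e => e) false).foldl
      (fun errors env =>
        let methods := PySem.List.sorted
          (PySem.Set.ofList ((triples.filter (fun t => t.1 == env)).map (fun t => t.2.1))) (fun m => m) false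
        if methods.length ≤ 1 then errors
        else
          let seeds := PySem.List.sorted
            (PySem.Set.ofList ((triples.filter (fun t => t.1 == env)).map (fun t => t.2.2))) (fun s => s) false
          let haveP := PySem.Set.ofList ((triples.filter (fun t => t.1 == env)).map (fun t => (t.2.1, t.2.2)))
          methods.foldl (fun errors m =>
            let missing := seeds.filter (fun s => !(PySem.Set.contains haveP (m, s)))
            if missing = [] then errors else errors ++ [pvErrMsg env m missing]) errors) []
  let warnings := if triples = [] then ["No (env_id, method, seed) rows found in summary_raw.csv"] else []
  (errors, warnings)

-- ===== PRECONDITION & SPEC =====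
def Spec_validate_seed_coverage_parity_py (raw_rows : List (List (String × String))) (out : List String × List String) : Prop := out = validate_seed_coverage_parity_py_alt raw_rows
instance (raw_rows : List (List (String × String))) (out : List String × List String) : Decidable (Spec_validate_seed_coverage_parity_py raw_rows out) := by unfold Spec_validate_seed_coverage_parity_py; infer_instance

-- ===== CLAIM (what is proved, stated in full; the proofs are below) =====
def Claim_equal_validate_seed_coverage_parity_py : Prop := ∀ (raw_rows : List (List (String × String))), Dom_validate_seed_coverage_parity_py raw_rows → Spec_validate_seed_coverage_parity_py raw_rows (validate_seed_coverage_parity_py raw_rows)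

-- ===== LEMMAS AND PROOFS =====

-- the triples both Pythons keep (B's _row_triple is also the row filter A applies inline)
def pvTs (raw_rows : List (List (String × String))) : List (String × String × Int) :=
  raw_rows.filterMap pvRowTriple

-- A's two grouped dicts, as folds over the kept triples
def pvSbem (ts : List (String × String × Int)) : PySem.Dict (String × String) (PySem.Set Int) :=
  ts.foldl (fun d t => PySem.Dict.modify d (t.1, t.2.1) PySem.Set.empty (fun v => PySem.Set.add v t.2.2)) PySem.Dict.empty

def pvMbe (ts : List (String × String × Int)) : PySem.Dict String (PySem.Set String) :=
  ts.foldl (fun d t => PySem.Dict.modify d t.1 PySem.Set.empty (fun v => PySem.Set.add v t.2.1)) PySem.Dict.empty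

def pvBodyA (sbem : PySem.Dict (String × String) (PySem.Set Int))
    (errors : List String) (kv : String × PySem.Set String) : List String :=
  let env_id := kv.1
  let methods := kv.2
  if PySem.Set.len methods ≤ 1 then errors
  else
    let union := methods.foldl (fun u m => PySem.Set.union u (sbem.getD (env_id, m) PySem.Set.empty)) PySem.Set.empty
    (PySem.List.sorted methods (fun m => m) false).foldl (fun errors m =>
      let haveS := sbem.getD (env_id, m) PySem.Set.empty
      let missing := PySem.List.sorted (PySem.Set.diff union haveS) (fun s => s) false
      if missing = [] then errors else errors ++ [pvErrMsg env_id m missing]) errors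

def pvBodyB (ts : List (String × String × Int)) (errors : List String) (env : String) : List String :=
  let methods := PySem.List.sorted
    (PySem.Set.ofList ((ts.filter (fun t => t.1 == env)).map (fun t => t.2.1))) (fun m => m) false
  if methods.length ≤ 1 then errors
  else
    let seeds := PySem.List.sorted
      (PySem.Set.ofList ((ts.filter (fun t => t.1 == env)).map (fun t => t.2.2))) (fun s => s) false
    let haveP := PySem.Set.ofList ((ts.filter (fun t => t.1 == env)).map (fun t => (t.2.1, t.2.2)))
    methods.foldl (fun errors m =>
      let missing := seeds.filter (fun s => !(PySem.Set.contains haveP (m, s)))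
      if missing = [] then errors else errors ++ [pvErrMsg env m missing]) errors

-- generic fold lemmas ----------------------------------------------------------

theorem pv_keys_foldl_modify {kappa alpha nu : Type} [BEq kappa] [LawfulBEq kappa]
    (key : alpha → kappa) (d0 : nu) (f : nu → alpha → nu) (l : List alpha) (init : PySem.Dict kappa nu) :
    (l.foldl (fun d x => PySem.Dict.modify d (key x) d0 (fun v => f v x)) init).keys
      = (l.map key).foldl PySem.Set.add init.keys := by
  induction l generalizing init with
  | nil => rfl
  | cons x l ih =>
    simp only [List.foldl_cons, List.map_cons, ih]
    congr 1
    rw [PySem.Dict.keys_modify]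
    by_cases h : init.contains (key x) = true
    · rw [PySem.Dict.keys_insert_of_contains _ _ h,
        PySem.Set.add_of_mem ((PySem.Dict.contains_iff_mem_keys _ _).mp h)]
    · rw [PySem.Dict.keys_insert_of_not_contains _ _ (by simpa using h),
        PySem.Set.add_of_not_mem (fun hm => h ((PySem.Dict.contains_iff_mem_keys _ _).mpr hm))]

theorem pv_getD_foldl_modify {kappa alpha nu : Type} [BEq kappa] [LawfulBEq kappa] [DecidableEq kappa]
    (key : alpha → kappa) (d0 : nu) (f : nu → alpha → nu) (l : List alpha) (init : PySem.Dict kappa nu) (k : kappa) :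
    (l.foldl (fun d x => PySem.Dict.modify d (key x) d0 (fun v => f v x)) init).getD k d0
      = (l.filter (fun x => key x == k)).foldl f (init.getD k d0) := by
  induction l generalizing init with
  | nil => rfl
  | cons x l ih =>
    simp only [List.foldl_cons, List.filter_cons, ih, PySem.Dict.getD_modify]
    by_cases h : k = key x
    · simp [h]
    · have : (key x == k) = false := by simpa using fun e => h e.symm
      simp [this, if_neg h]

theorem pv_mem_foldl_union {alpha kappa : Type} [BEq kappa] [LawfulBEq kappa]
    (g : alpha → PySem.Set kappa) (l : List alpha) (acc : PySem.Set kappa) (y : kappa) :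
    y ∈ l.foldl (fun acc x => PySem.Set.union acc (g x)) acc ↔ y ∈ acc ∨ ∃ x ∈ l, y ∈ g x := by
  induction l generalizing acc with
  | nil => simp
  | cons x l ih =>
    simp only [List.foldl_cons, ih, PySem.Set.mem_union, List.mem_cons]
    constructor
    · rintro ((h | h) | ⟨z, hz, hy⟩)
      · exact Or.inl h
      · exact Or.inr ⟨x, Or.inl rfl, h⟩
      · exact Or.inr ⟨z, Or.inr hz, hy⟩
    · rintro (h | ⟨z, (rfl | hz), hy⟩)
      · exact Or.inl (Or.inl h)
      · exact Or.inl (Or.inr hy)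
      · exact Or.inr ⟨z, hz, hy⟩

theorem pv_nodup_foldl_union {alpha kappa : Type} [BEq kappa] [LawfulBEq kappa]
    (g : alpha → PySem.Set kappa) (l : List alpha) (acc : PySem.Set kappa) (h : acc.Nodup) :
    (l.foldl (fun acc x => PySem.Set.union acc (g x)) acc).Nodup := by
  induction l generalizing acc with
  | nil => exact h
  | cons x l ih => exact ih _ (PySem.Set.nodup_union _ _ h)

-- port unfoldings ---------------------------------------------------------------

def pvGA (st : PySem.Dict (String × String) (PySem.Set Int) × PySem.Dict String (PySem.Set String))
    (t : String × String × Int) :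
    PySem.Dict (String × String) (PySem.Set Int) × PySem.Dict String (PySem.Set String) :=
  (PySem.Dict.modify st.1 (t.1, t.2.1) PySem.Set.empty (fun v => PySem.Set.add v t.2.2),
   PySem.Dict.modify st.2 t.1 PySem.Set.empty (fun v => PySem.Set.add v t.2.1))

def pvStepOf {sigma : Type} (g : sigma → (String × String × Int) → sigma)
    (st : sigma) (r : List (String × String)) : sigma :=
  match pvRowTriple r with
  | none => st
  | some t => g st t

theorem pv_foldl_stepOf {sigma : Type} (g : sigma → (String × String × Int) → sigma)
    (l : List (List (String × String))) (init : sigma) :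
    l.foldl (pvStepOf g) init = (pvTs l).foldl g init := by
  rw [pvTs]
  induction l generalizing init with
  | nil => rfl
  | cons x l ih =>
    simp only [List.foldl_cons, List.filterMap_cons]
    cases h : pvRowTriple x <;> simp [pvStepOf, h, ih]

theorem pvA_eq (raw_rows : List (List (String × String))) :
    validate_seed_coverage_parity_py raw_rows =
      ((PySem.List.sorted (pvMbe (pvTs raw_rows)).items (fun kv => kv.1) false).foldl
          (pvBodyA (pvSbem (pvTs raw_rows))) [],
        if (pvSbem (pvTs raw_rows)).items = []
          then ["No (env_id, method, seed) rows found in summary_raw.csv"] else []) := by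
  have hstep : (fun (st : PySem.Dict (String × String) (PySem.Set Int) × PySem.Dict String (PySem.Set String)) r =>
      let d : PySem.Dict String String := PySem.Dict.mk r
      let env_id := PySem.Str.strip ((d.get? "env_id").getD "")
      let method := PySem.Str.strip ((d.get? "method").getD "")
      match pvAsInt_py (d.get? "seed") with
      | none => st
      | some s =>
        if env_id = "" ∨ method = "" then st
        else (PySem.Dict.modify st.1 (env_id, method) PySem.Set.empty (fun v => PySem.Set.add v s),
              PySem.Dict.modify st.2 env_id PySem.Set.empty (fun v => PySem.Set.add v method)))
      = pvStepOf pvGA := by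
    funext st r
    simp only [pvStepOf, pvRowTriple, pvAsInt_py, pvGA]
    cases h : ((PySem.Dict.mk r : PySem.Dict String String).get? "seed").bind PySem.Int.ofStr? with
    | none => simp
    | some s =>
      by_cases hc : PySem.Str.strip (((PySem.Dict.mk r : PySem.Dict String String).get? "env_id").getD "") = ""
          ∨ PySem.Str.strip (((PySem.Dict.mk r : PySem.Dict String String).get? "method").getD "") = "" <;>
        simp [hc]
  simp only [validate_seed_coverage_parity_py, hstep, pv_foldl_stepOf]
  rw [show pvGA = (fun st t =>
      ((fun d (t : String × String × Int) => PySem.Dict.modify d (t.1, t.2.1) PySem.Set.empty (fun v => PySem.Set.add v t.2.2)) st.1 t,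
       (fun d (t : String × String × Int) => PySem.Dict.modify d t.1 PySem.Set.empty (fun v => PySem.Set.add v t.2.1)) st.2 t)) from rfl,
    PySem.List.foldl_prod_mk
      (f := fun d (t : String × String × Int) => PySem.Dict.modify d (t.1, t.2.1) PySem.Set.empty (fun v => PySem.Set.add v t.2.2))
      (g := fun d (t : String × String × Int) => PySem.Dict.modify d t.1 PySem.Set.empty (fun v => PySem.Set.add v t.2.1))]
  rfl

theorem pv_triples_eq (l : List (List (String × String))) (acc : List (String × String × Int)) :
    l.foldl (fun acc r => match pvRowTriple r with | none => acc | some t => acc ++ [t]) acc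
      = acc ++ l.filterMap pvRowTriple := by
  induction l generalizing acc with
  | nil => simp
  | cons x l ih => cases h : pvRowTriple x <;> simp [h, ih]

theorem pvB_eq (raw_rows : List (List (String × String))) :
    validate_seed_coverage_parity_py_alt raw_rows =
      ((PySem.List.sorted (PySem.Set.ofList ((pvTs raw_rows).map (fun t => t.1))) (fun e => e) false).foldl
          (pvBodyB (pvTs raw_rows)) [],
        if pvTs raw_rows = []
          then ["No (env_id, method, seed) rows found in summary_raw.csv"] else []) := by
  simp only [validate_seed_coverage_parity_py_alt, pv_triples_eq, List.nil_append]
  rfl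

-- structure characterizations ---------------------------------------------------

theorem pv_mbe_keys (ts : List (String × String × Int)) :
    (pvMbe ts).keys = PySem.Set.ofList (ts.map (fun t => t.1)) := by
  rw [pvMbe, pv_keys_foldl_modify (fun t => t.1) PySem.Set.empty (fun v t => PySem.Set.add v t.2.1) ts PySem.Dict.empty,
    PySem.Dict.keys_empty, PySem.Set.ofList_eq_foldl]

theorem pv_mbe_getD (ts : List (String × String × Int)) (e : String) :
    (pvMbe ts).getD e PySem.Set.empty
      = PySem.Set.ofList ((ts.filter (fun t => t.1 == e)).map (fun t => t.2.1)) := by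
  rw [pvMbe, pv_getD_foldl_modify (fun t => t.1) PySem.Set.empty (fun v t => PySem.Set.add v t.2.1) ts PySem.Dict.empty e,
    PySem.Dict.getD_empty,
    ← PySem.Set.update_map_eq_foldl_add, show (PySem.Set.empty : PySem.Set _) = [] from rfl,
    PySem.Set.update_nil_left]

theorem pv_sbem_getD (ts : List (String × String × Int)) (e m : String) :
    (pvSbem ts).getD (e, m) PySem.Set.empty
      = PySem.Set.ofList ((ts.filter (fun t => (t.1, t.2.1) == (e, m))).map (fun t => t.2.2)) := by
  rw [pvSbem, pv_getD_foldl_modify (fun t => (t.1, t.2.1)) PySem.Set.empty (fun v t => PySem.Set.add v t.2.2) ts PySem.Dict.empty (e, m),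
    PySem.Dict.getD_empty,
    ← PySem.Set.update_map_eq_foldl_add, show (PySem.Set.empty : PySem.Set _) = [] from rfl,
    PySem.Set.update_nil_left]

theorem pv_sbem_keys (ts : List (String × String × Int)) :
    (pvSbem ts).keys = PySem.Set.ofList (ts.map (fun t => (t.1, t.2.1))) := by
  rw [pvSbem, pv_keys_foldl_modify (fun t => (t.1, t.2.1)) PySem.Set.empty
      (fun v t => PySem.Set.add v t.2.2) ts PySem.Dict.empty,
    PySem.Dict.keys_empty, PySem.Set.ofList_eq_foldl]

-- membership characterizations --------------------------------------------------

theorem pv_mem_mbe (ts : List (String × String × Int)) (e m : String) :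
    m ∈ (pvMbe ts).getD e PySem.Set.empty ↔ ∃ t ∈ ts, t.1 = e ∧ t.2.1 = m := by
  rw [pv_mbe_getD]
  simp only [PySem.Set.mem_ofList, List.mem_map, List.mem_filter, beq_iff_eq]
  constructor
  · rintro ⟨t, ⟨ht, he⟩, hm⟩; exact ⟨t, ht, he, hm⟩
  · rintro ⟨t, ht, he, hm⟩; exact ⟨t, ⟨ht, he⟩, hm⟩

theorem pv_mem_sbem (ts : List (String × String × Int)) (e m : String) (s : Int) :
    s ∈ (pvSbem ts).getD (e, m) PySem.Set.empty ↔ ∃ t ∈ ts, t.1 = e ∧ t.2.1 = m ∧ t.2.2 = s := by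
  rw [pv_sbem_getD]
  simp only [PySem.Set.mem_ofList, List.mem_map, List.mem_filter, beq_iff_eq, Prod.mk.injEq]
  constructor
  · rintro ⟨t, ⟨ht, he, hm⟩, hs⟩; exact ⟨t, ht, he, hm, hs⟩
  · rintro ⟨t, ht, he, hm, hs⟩; exact ⟨t, ⟨ht, he, hm⟩, hs⟩

theorem pv_mem_envmap {alpha : Type} [BEq alpha] [LawfulBEq alpha]
    (ts : List (String × String × Int)) (e : String) (f : String × String × Int → alpha) (y : alpha) :
    y ∈ PySem.Set.ofList ((ts.filter (fun t => t.1 == e)).map f)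
      ↔ ∃ t ∈ ts, t.1 = e ∧ f t = y := by
  simp only [PySem.Set.mem_ofList, List.mem_map, List.mem_filter, beq_iff_eq]
  constructor
  · rintro ⟨t, ⟨ht, he⟩, hy⟩; exact ⟨t, ht, he, hy⟩
  · rintro ⟨t, ht, he, hy⟩; exact ⟨t, ⟨ht, he⟩, hy⟩

theorem pv_mem_unionA (ts : List (String × String × Int)) (e : String) (s : Int) :
    s ∈ ((pvMbe ts).getD e PySem.Set.empty).foldl
        (fun u m => PySem.Set.union u ((pvSbem ts).getD (e, m) PySem.Set.empty)) PySem.Set.empty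
      ↔ ∃ t ∈ ts, t.1 = e ∧ t.2.2 = s := by
  rw [pv_mem_foldl_union]
  constructor
  · rintro (h | ⟨m, _, hs⟩)
    · exact absurd h (List.not_mem_nil)
    · rcases (pv_mem_sbem ts e m s).mp hs with ⟨t, ht, he, _, hs'⟩
      exact ⟨t, ht, he, hs'⟩
  · rintro ⟨t, ht, he, hs⟩
    exact Or.inr ⟨t.2.1, (pv_mem_mbe ts e t.2.1).mpr ⟨t, ht, he, rfl⟩,
      (pv_mem_sbem ts e t.2.1 s).mpr ⟨t, ht, he, rfl, hs⟩⟩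

-- per-env equality of the loop bodies ------------------------------------------

theorem pv_ofList_map_nil {alpha beta : Type} [BEq beta] [LawfulBEq beta]
    (f : alpha → beta) (ts : List alpha) :
    PySem.Set.ofList (ts.map f) = [] ↔ ts = [] := by
  constructor
  · intro h
    cases ts with
    | nil => rfl
    | cons t ts =>
      exfalso
      have : f t ∈ PySem.Set.ofList ((t :: ts).map f) :=
        (PySem.Set.mem_ofList _ _).mpr (List.mem_map_of_mem (List.mem_cons_self ..))
      rw [h] at this
      exact (List.not_mem_nil) this
  · rintro rfl; rfl

theorem pv_missing_eq (ts : List (String × String × Int)) (e m : String) :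
    PySem.List.sorted
      (PySem.Set.diff
        (((pvMbe ts).getD e PySem.Set.empty).foldl
          (fun u m' => PySem.Set.union u ((pvSbem ts).getD (e, m') PySem.Set.empty)) PySem.Set.empty)
        ((pvSbem ts).getD (e, m) PySem.Set.empty)) (fun s => s) false
    = (PySem.List.sorted
        (PySem.Set.ofList ((ts.filter (fun t => t.1 == e)).map (fun t => t.2.2))) (fun s => s) false).filter
        (fun s => !(PySem.Set.contains
          (PySem.Set.ofList ((ts.filter (fun t => t.1 == e)).map (fun t => (t.2.1, t.2.2)))) (m, s))) := by
  have hpair : ((PySem.List.sorted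
      (PySem.Set.ofList ((ts.filter (fun t => t.1 == e)).map (fun t => t.2.2))) (fun s => s) false).filter
      (fun s => !(PySem.Set.contains
        (PySem.Set.ofList ((ts.filter (fun t => t.1 == e)).map (fun t => (t.2.1, t.2.2)))) (m, s)))).Pairwise
      (· < ·) :=
    List.Pairwise.sublist List.filter_sublist (PySem.List.sorted_ofList_pairwise_lt _)
  refine PySem.List.sorted_eq_of_perm_of_pairwise_lt _ _ _ ?_ hpair
  have hX : (PySem.Set.diff
      (((pvMbe ts).getD e PySem.Set.empty).foldl
        (fun u m' => PySem.Set.union u ((pvSbem ts).getD (e, m') PySem.Set.empty)) PySem.Set.empty)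
      ((pvSbem ts).getD (e, m) PySem.Set.empty)).Nodup :=
    PySem.Set.nodup_diff _ _ (pv_nodup_foldl_union _ _ _ List.nodup_nil)
  refine (List.perm_ext_iff_of_nodup (hpair.imp (fun h => ne_of_lt h)) hX).mpr (fun s => ?_)
  have hhave : ((m, s) ∈ PySem.Set.ofList
      ((ts.filter (fun t => t.1 == e)).map (fun t => (t.2.1, t.2.2))))
      ↔ ∃ t ∈ ts, t.1 = e ∧ t.2.1 = m ∧ t.2.2 = s := by
    rw [pv_mem_envmap]
    constructor
    · rintro ⟨t, ht, he, hp⟩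
      exact ⟨t, ht, he, congrArg Prod.fst hp, congrArg Prod.snd hp⟩
    · rintro ⟨t, ht, he, h1, h2⟩
      exact ⟨t, ht, he, by rw [h1, h2]⟩
  have hc : (!(PySem.Set.contains
      (PySem.Set.ofList ((ts.filter (fun t => t.1 == e)).map (fun t => (t.2.1, t.2.2)))) (m, s))) = true
      ↔ ¬ (∃ t ∈ ts, t.1 = e ∧ t.2.1 = m ∧ t.2.2 = s) := by
    rw [Bool.not_eq_eq_eq_not, Bool.not_true, ← Bool.not_eq_true, PySem.Set.contains_iff, hhave]
  rw [List.mem_filter, PySem.List.mem_sorted, PySem.Set.mem_diff, pv_mem_unionA, pv_mem_sbem,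
    pv_mem_envmap, hc]

theorem pv_body_eq (ts : List (String × String × Int)) (errors : List String) (e : String) :
    pvBodyA (pvSbem ts) errors (e, (pvMbe ts).getD e PySem.Set.empty) = pvBodyB ts errors e := by
  simp only [pvBodyA, pvBodyB]
  have hsortedM : PySem.List.sorted ((pvMbe ts).getD e PySem.Set.empty) (fun m => m) false
      = PySem.List.sorted
          (PySem.Set.ofList ((ts.filter (fun t => t.1 == e)).map (fun t => t.2.1))) (fun m => m) false := by
    rw [pv_mbe_getD]
  have hlen : (PySem.Set.len ((pvMbe ts).getD e PySem.Set.empty) ≤ 1)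
      ↔ ((PySem.List.sorted
          (PySem.Set.ofList ((ts.filter (fun t => t.1 == e)).map (fun t => t.2.1))) (fun m => m) false).length ≤ 1) := by
    rw [PySem.List.length_sorted, pv_mbe_getD]
    simp only [PySem.Set.len]
    omega
  by_cases hle : PySem.Set.len ((pvMbe ts).getD e PySem.Set.empty) ≤ 1
  · rw [if_pos hle, if_pos (hlen.mp hle)]
  · rw [if_neg hle, if_neg (fun h => hle (hlen.mpr h)), hsortedM]
    refine PySem.List.foldl_congr_mem _ _ _ _ (fun errors' m _ => ?_)
    rw [pv_missing_eq ts e m]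

-- outer alignment ---------------------------------------------------------------

theorem pv_items_eq_map_keys (ts : List (String × String × Int)) :
    (pvMbe ts).items = (pvMbe ts).keys.map (fun k => (k, (pvMbe ts).getD k PySem.Set.empty)) := by
  have hnd : (pvMbe ts).keys.Nodup := by
    rw [pv_mbe_keys]; exact PySem.Set.nodup_ofList _
  have h : ∀ p ∈ (pvMbe ts).items,
      ((p.1, (pvMbe ts).getD p.1 PySem.Set.empty) : String × PySem.Set String) = p := by
    rintro ⟨k, v⟩ hp
    have := PySem.Dict.get?_of_mem_items (pvMbe ts) hp hnd
    simp [PySem.Dict.getD_of_get?_eq_some _ _ this]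
  calc (pvMbe ts).items
      = (pvMbe ts).items.map id := (List.map_id _).symm
    _ = (pvMbe ts).items.map ((fun k => (k, (pvMbe ts).getD k PySem.Set.empty)) ∘ (fun p => p.1)) :=
        List.map_congr_left (fun p hp => (h p hp).symm)
    _ = ((pvMbe ts).items.map (fun p => p.1)).map (fun k => (k, (pvMbe ts).getD k PySem.Set.empty)) :=
        (List.map_map).symm
    _ = (pvMbe ts).keys.map (fun k => (k, (pvMbe ts).getD k PySem.Set.empty)) := rfl

theorem pv_AB (ts : List (String × String × Int)) :
    ((PySem.List.sorted (pvMbe ts).items (fun kv => kv.1) false).foldl (pvBodyA (pvSbem ts)) [],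
      if (pvSbem ts).items = [] then ["No (env_id, method, seed) rows found in summary_raw.csv"] else [])
    = ((PySem.List.sorted (PySem.Set.ofList (ts.map (fun t => t.1))) (fun e => e) false).foldl
        (pvBodyB ts) [],
      if ts = [] then ["No (env_id, method, seed) rows found in summary_raw.csv"] else []) := by
  have hwarn : ((pvSbem ts).items = []) ↔ (ts = []) := by
    constructor
    · intro h
      have : (pvSbem ts).keys = [] := by
        show (pvSbem ts).items.map _ = []
        rw [h]; rfl
      rw [pv_sbem_keys] at this
      exact (pv_ofList_map_nil _ _).mp this
    · rintro rfl; rfl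
  have herr : (PySem.List.sorted (pvMbe ts).items (fun kv => kv.1) false).foldl (pvBodyA (pvSbem ts)) []
      = (PySem.List.sorted (PySem.Set.ofList (ts.map (fun t => t.1))) (fun e => e) false).foldl (pvBodyB ts) [] := by
    have hsorted : PySem.List.sorted (pvMbe ts).items (fun kv => kv.1) false
        = (PySem.List.sorted (PySem.Set.ofList (ts.map (fun t => t.1))) (fun e => e) false).map
            (fun k => (k, (pvMbe ts).getD k PySem.Set.empty)) := by
      apply PySem.List.sorted_eq_of_perm_of_pairwise_lt
      · rw [pv_items_eq_map_keys ts, pv_mbe_keys]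
        exact (PySem.List.sorted_perm _ _ _).map _
      · rw [List.pairwise_map]
        exact PySem.List.sorted_ofList_pairwise_lt _
    rw [hsorted, List.foldl_map]
    exact PySem.List.foldl_congr_mem _ _ _ _ (fun errors' k _ => pv_body_eq ts errors' k)
  rw [herr]
  simp only [hwarn]

-- ===== VERDICT (by name: the statement is the Claim_ definition above) =====
theorem validate_seed_coverage_parity_py_spec : Claim_equal_validate_seed_coverage_parity_py := by
  intro raw_rows _
  show validate_seed_coverage_parity_py raw_rows = validate_seed_coverage_parity_py_alt raw_rows
  rw [pvA_eq, pvB_eq, pv_AB]
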